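-- pv_equiv track=rewrite | github.com/Mightybeast12/css-to-rust-converter | css_to_rust/utils.py | group_related_selectors
-- ===== SOURCE A (Python) =====
-- from typing import List, Dict, Any, Optional
--
-- def extract_class_name(selector: str) -> Optional[str]:
--     """Extract the main class name from a CSS selector."""
--     # Remove pseudo-selectors first
--     base_selector = selector.split(':')[0].strip()
--
--     # Extract class name (remove leading dot)
--     if base_selector.startswith('.'):
--         return base_selector[1:]
--
--     # Handle ID selectors
--     if base_selector.startswith('#'):
--         return base_selector[1:]
--
--     # Handle element selectors
--     if ' ' not in base_selector and '.' not in base_selector: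
--         return base_selector
--
--     return None
--
-- def group_related_selectors(selectors: List[str]) -> Dict[str, List[str]]:
--     """Group related CSS selectors together."""
--     groups = {}
--
--     for selector in selectors:
--         # Extract base name
--         base_name = extract_class_name(selector)
--         if not base_name:
--             continue
--
--         # Find the root component name
--         root_name = base_name.split('-')[0] if '-' in base_name else base_name
--
--         if root_name not in groups:
--             groups[root_name] = []
--
--         groups[root_name].append(selector)
--
--     return groups
-- ===== SOURCE B (Python) =====
-- from typing import List, Dict, Optional
--
-- def extract_class_name(selector: str) -> Optional[str]:
--     """Extract the main class name from a CSS selector."""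
--     base_selector = selector.split(':')[0].strip()
--     if base_selector.startswith('.'):
--         return base_selector[1:]
--     if base_selector.startswith('#'):
--         return base_selector[1:]
--     if ' ' not in base_selector and '.' not in base_selector:
--         return base_selector
--     return None
--
-- def group_related_selectors(selectors: List[str]) -> Dict[str, List[str]]:
--     """Group related CSS selectors together (two-pass: pair up, then collect per root)."""
--     pairs = []
--     for selector in selectors:
--         base_name = extract_class_name(selector)
--         if base_name:
--             root = base_name.split('-')[0] if '-' in base_name else base_name
--             pairs.append((root, selector))
--     roots = dict.fromkeys(root for root, _ in pairs)
--     return {root: [s for r, s in pairs if r == root] for root in roots}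
-- ===== Notes on version B (the rewrite author's own statement) =====
-- stated objective: alternative
-- what changed: B replaces A's incremental dict mutation (membership test, seed with [], append per selector) with a two-pass decomposition: one pass collecting (root, selector) pairs, then dict.fromkeys to dedup the roots in first-occurrence order and a per-root comprehension collecting each group's selectors.
import Mathlib
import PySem

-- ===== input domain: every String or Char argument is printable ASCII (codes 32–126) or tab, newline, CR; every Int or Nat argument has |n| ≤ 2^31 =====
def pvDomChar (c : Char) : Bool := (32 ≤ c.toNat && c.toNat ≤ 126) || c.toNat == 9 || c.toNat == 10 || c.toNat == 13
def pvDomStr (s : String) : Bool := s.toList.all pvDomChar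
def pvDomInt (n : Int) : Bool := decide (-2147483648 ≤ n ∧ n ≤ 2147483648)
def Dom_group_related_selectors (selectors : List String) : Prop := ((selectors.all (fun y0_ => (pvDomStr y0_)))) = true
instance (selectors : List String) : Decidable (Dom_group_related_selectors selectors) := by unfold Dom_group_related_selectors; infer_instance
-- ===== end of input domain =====

-- ===== PORT A =====
-- B changes the decomposition: one pass building (root, selector) pairs, then the deduped roots and a
-- per-root collection — instead of A's incremental dict mutation; objective: alternative.

-- shared helper (identical source in Source A and Source B): extract_class_name
def extract_class_name (selector : String) : Option String :=
  -- str.split(sep) never returns an empty list, so Python's `[0]` is the head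
  let base_selector := PySem.Str.strip (((PySem.Str.split? selector ":").getD []).headD "")
  if PySem.Str.startswith base_selector "." then some (PySem.Str.slice base_selector (some 1) none)
  else if PySem.Str.startswith base_selector "#" then some (PySem.Str.slice base_selector (some 1) none)
  else if ¬ PySem.Str.isIn " " base_selector ∧ ¬ PySem.Str.isIn "." base_selector then some base_selector
  else none

-- shared helper (identical expression in Source A and Source B): base_name.split('-')[0] if '-' in base_name else base_name
def rootOf (base_name : String) : String :=
  if PySem.Str.isIn "-" base_name then ((PySem.Str.split? base_name "-").getD []).headD ""
  else base_name

def group_related_selectors (selectors : List String) : List (String × List String) :=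
  (selectors.foldl (fun groups selector =>
      match extract_class_name selector with
      | none => groups                                  -- `if not base_name: continue` (None case)
      | some base_name =>
        if base_name = "" then groups                   -- `if not base_name: continue` (empty string)
        else
          let root_name := rootOf base_name
          let groups1 := if groups.contains root_name then groups
                         else groups.insert root_name ([] : List String)
          groups1.insert root_name (groups1.getD root_name [] ++ [selector]))
    (PySem.Dict.empty : PySem.Dict String (List String))).items

-- ===== PORT B =====
def group_related_selectors_alt (selectors : List String) : List (String × List String) :=
  let pairs := selectors.foldl (fun ps selector =>
      match extract_class_name selector with
      | none => ps
      | some base_name =>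
        if base_name = "" then ps
        else ps ++ [(rootOf base_name, selector)]) []
  let roots := PySem.List.dedup (pairs.map (·.1))
  (roots.foldl (fun d root =>
      d.insert root ((pairs.filter (fun p => p.1 == root)).map (·.2)))
    (PySem.Dict.empty : PySem.Dict String (List String))).items

-- ===== PRECONDITION & SPEC =====
def Spec_group_related_selectors (selectors : List String) (out : List (String × List String)) : Prop := out = group_related_selectors_alt selectors
instance (selectors : List String) (out : List (String × List String)) : Decidable (Spec_group_related_selectors selectors out) := by unfold Spec_group_related_selectors; infer_instance

-- ===== CLAIM (what is proved, stated in full; the proofs are below) =====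
def Claim_equal_group_related_selectors : Prop := ∀ (selectors : List String), Dom_group_related_selectors selectors → Spec_group_related_selectors selectors (group_related_selectors selectors)

-- ===== LEMMAS AND PROOFS =====

-- the (root, selector) pair a selector contributes, if any; f/r stand for extract_class_name/rootOf
def pairOf (f : String → Option String) (r : String → String) (selector : String) :
    Option (String × String) :=
  match f selector with
  | none => none
  | some b => if b = "" then none else some (r b, selector)

-- A's loop is the modify-fold over the contributed pairs
theorem foldA_eq (f : String → Option String) (r : String → String)
    (sels : List String) (d : PySem.Dict String (List String)) :
    sels.foldl (fun groups selector =>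
      match f selector with
      | none => groups
      | some base_name =>
        if base_name = "" then groups
        else
          let root_name := r base_name
          let groups1 := if groups.contains root_name then groups
                         else groups.insert root_name ([] : List String)
          groups1.insert root_name (groups1.getD root_name [] ++ [selector])) d
    = (sels.filterMap (pairOf f r)).foldl (fun d p => d.modify p.1 [] (· ++ [p.2])) d := by
  induction sels generalizing d with
  | nil => rfl
  | cons s rest ih =>
    simp only [List.foldl_cons, List.filterMap_cons, pairOf]
    cases hx : f s with
    | none => exact ih d
    | some b =>
      by_cases hb : b = ""
      · simp only [hb, if_true]; exact ih d
      · simp only [if_neg hb, List.foldl_cons]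
        have hstep : ∀ (d : PySem.Dict String (List String)) (k s : String),
            (let d1 := if d.contains k then d else d.insert k ([] : List String)
             d1.insert k (d1.getD k [] ++ [s])) = d.modify k [] (· ++ [s]) := by
          intro d k s
          by_cases h : d.contains k
          · simp [h, PySem.Dict.modify]
          · have h' : d.contains k = false := by simpa using h
            simp only [if_neg h]
            rw [PySem.Dict.insert_insert_self, PySem.Dict.getD_insert_self]
            simp [PySem.Dict.modify, PySem.Dict.getD_of_not_contains d ([] : List String) h']
        rw [← hstep d (r b) s]
        exact ih _

-- B's append-fold builds exactly the contributed pairs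
theorem foldB_eq (f : String → Option String) (r : String → String)
    (sels : List String) (acc : List (String × String)) :
    sels.foldl (fun ps selector =>
      match f selector with
      | none => ps
      | some base_name =>
        if base_name = "" then ps
        else ps ++ [(r base_name, selector)]) acc
    = acc ++ sels.filterMap (pairOf f r) := by
  induction sels generalizing acc with
  | nil => simp
  | cons s rest ih =>
    simp only [List.foldl_cons, List.filterMap_cons, pairOf]
    cases hx : f s with
    | none => simpa using ih acc
    | some b =>
      by_cases hb : b = ""
      · simp only [hb, if_true]; simpa using ih acc
      · simp [if_neg hb, ih, pairOf]

-- the items of the modify-fold over any pair list are B's per-root collection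
theorem items_modify_fold (ps : List (String × String)) :
    (ps.foldl (fun d p => d.modify p.1 [] (· ++ [p.2]))
        (PySem.Dict.empty : PySem.Dict String (List String))).items
    = (PySem.List.dedup (ps.map (·.1))).map
        (fun r => (r, (ps.filter (fun p => p.1 == r)).map (·.2))) := by
  have hnd : ((ps.foldl (fun d p => d.modify p.1 [] (· ++ [p.2]))
      (PySem.Dict.empty : PySem.Dict String (List String))).keys).Nodup :=
    PySem.Dict.nodup_keys_foldl_modify_key ps Prod.fst [] (fun d p v => v ++ [p.2]) _ (by simp)
  rw [PySem.Dict.items_eq_map_keys _ hnd ([] : List String),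
    PySem.Dict.keys_foldl_modify_key ps Prod.fst [] (fun d p v => v ++ [p.2])]
  have hkeys : PySem.Set.update (PySem.Dict.empty : PySem.Dict String (List String)).keys
      (ps.map Prod.fst) = PySem.List.dedup (ps.map (·.1)) := by
    simp [PySem.List.dedup_eq_ofList, PySem.Set.ofList, PySem.Set.update]
  rw [hkeys]
  exact List.map_congr_left fun r _ => by
    simp [PySem.Dict.getD_foldl_modify_append]

-- ===== VERDICT (by name: the statement is the Claim_ definition above) =====
theorem group_related_selectors_spec : Claim_equal_group_related_selectors := by
  intro selectors _
  unfold Spec_group_related_selectors group_related_selectors group_related_selectors_alt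
  rw [foldA_eq extract_class_name rootOf, foldB_eq extract_class_name rootOf,
    items_modify_fold, List.nil_append]
  set ps := selectors.filterMap (pairOf extract_class_name rootOf) with hps
  rw [PySem.Dict.items_foldl_insert_fresh (PySem.List.dedup (ps.map (·.1))) (fun r => r)
        (fun r => (ps.filter (fun p => p.1 == r)).map (·.2)) PySem.Dict.empty
        (fun a _ => by simp) (by simp)]
  simp [PySem.Dict.empty]
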